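-- pv_equiv track=rewrite | github.com/kuznetsovvj/education | algorithms/codeforces/1754a.py | check
-- ===== SOURCE A (Python) =====
-- def check(w):
--     state = 0
--     for i in range(len(w)):
--         if w[i] == 'A':
--             if state > 0:
--                 state -= 1
--         else:
--             state += 1
--     if state > 0:
--         return "No"
--     return "Yes"
-- ===== SOURCE B (Python) =====
-- def check(w):
--     answers = 0
--     for c in reversed(w):
--         if c == 'A':
--             answers += 1
--         elif answers > 0:
--             answers -= 1
--         else:
--             return "No"
--     return "Yes"
-- ===== Notes on version B (the rewrite author's own statement) =====
-- stated objective: alternative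
-- what changed: B scans the string right-to-left, counting answer characters still available and failing immediately when a question finds none, instead of A's left-to-right pending-question counter checked only after the full scan.
import Mathlib
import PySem

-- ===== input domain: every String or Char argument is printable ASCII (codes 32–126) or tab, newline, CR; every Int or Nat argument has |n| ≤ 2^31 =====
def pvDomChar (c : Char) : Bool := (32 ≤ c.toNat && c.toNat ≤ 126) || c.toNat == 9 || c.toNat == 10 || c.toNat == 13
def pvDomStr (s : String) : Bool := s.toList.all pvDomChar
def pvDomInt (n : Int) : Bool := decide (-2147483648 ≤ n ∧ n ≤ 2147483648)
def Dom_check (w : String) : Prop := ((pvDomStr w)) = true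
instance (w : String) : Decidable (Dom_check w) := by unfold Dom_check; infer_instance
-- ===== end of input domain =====

-- B replaces A's left-to-right pending-question counter (checked after the whole scan)
-- by a right-to-left scan counting available 'A' answers with an early "No"; alternative decomposition, same cost.

-- ===== PORT A =====
-- forward loop: 'A' answers a pending question if any, anything else adds a question
def checkStep (state : Int) (c : Char) : Int :=
  if c = 'A' then (if state > 0 then state - 1 else state) else state + 1

def check (w : String) : String :=
  let state := w.toList.foldl checkStep 0
  if state > 0 then "No" else "Yes"

-- ===== PORT B =====
-- right-to-left scan (recursion over the reversed character list), early return "No"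
def checkAltGo : List Char → Int → String
  | [], _ => "Yes"
  | c :: rest, answers =>
      if c = 'A' then checkAltGo rest (answers + 1)
      else if answers > 0 then checkAltGo rest (answers - 1)
      else "No"

def check_alt (w : String) : String := checkAltGo w.toList.reverse 0

-- ===== PRECONDITION & SPEC =====
def Spec_check (w : String) (out : String) : Prop := out = check_alt w
instance (w : String) (out : String) : Decidable (Spec_check w out) := by unfold Spec_check; infer_instance

-- ===== CLAIM (what is proved, stated in full; the proofs are below) =====
def Claim_equal_check : Prop := ∀ (w : String), Dom_check w → Spec_check w (check w)

-- ===== LEMMAS AND PROOFS =====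

theorem checkStep_nonneg (cs : List Char) (a : Int) (h : 0 ≤ a) :
    0 ≤ cs.foldl checkStep a := by
  induction cs generalizing a with
  | nil => exact h
  | cons c rest ih =>
      simp only [List.foldl_cons]
      apply ih
      unfold checkStep
      split_ifs <;> omega

-- key invariant: B's reverse scan with `a` banked answers succeeds iff A's
-- forward counter over the unreversed list is at most `a`.
theorem checkAltGo_iff (rs : List Char) (a : Int) (h : 0 ≤ a) :
    checkAltGo rs a = "Yes" ↔ rs.reverse.foldl checkStep 0 ≤ a := by
  induction rs generalizing a with
  | nil => simp [checkAltGo, h]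
  | cons c rest ih =>
      have hs' : 0 ≤ rest.reverse.foldl checkStep 0 := checkStep_nonneg _ 0 le_rfl
      simp only [List.reverse_cons, List.foldl_append, List.foldl_cons, List.foldl_nil]
      unfold checkAltGo
      by_cases hc : c = 'A'
      · rw [if_pos hc]
        rw [ih (a + 1) (by omega)]
        have hstep : checkStep (rest.reverse.foldl checkStep 0) c
            = (if rest.reverse.foldl checkStep 0 > 0
               then rest.reverse.foldl checkStep 0 - 1
               else rest.reverse.foldl checkStep 0) := by
          simp [checkStep, hc]
        rw [hstep]
        split_ifs <;> omega
      · rw [if_neg hc]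
        have hstep : checkStep (rest.reverse.foldl checkStep 0) c
            = rest.reverse.foldl checkStep 0 + 1 := by
          simp [checkStep, hc]
        rw [hstep]
        by_cases ha : a > 0
        · rw [if_pos ha, ih (a - 1) (by omega)]
          omega
        · rw [if_neg ha]
          constructor
          · intro hcontra; exact absurd hcontra (by decide)
          · intro hle; omega

theorem checkAltGo_cases (rs : List Char) (a : Int) :
    checkAltGo rs a = "Yes" ∨ checkAltGo rs a = "No" := by
  induction rs generalizing a with
  | nil => left; rfl
  | cons c rest ih =>
      unfold checkAltGo
      split_ifs
      · exact ih _
      · exact ih _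
      · right; rfl

-- ===== VERDICT (by name: the statement is the Claim_ definition above) =====
theorem check_spec : Claim_equal_check := by
  intro w _
  unfold Spec_check check check_alt
  have hiff := checkAltGo_iff w.toList.reverse 0 le_rfl
  rw [List.reverse_reverse] at hiff
  rcases checkAltGo_cases w.toList.reverse 0 with h | h <;> rw [h]
  · have := hiff.mp h
    simp only []
    rw [if_neg (by omega)]
  · have : ¬ w.toList.foldl checkStep 0 ≤ 0 := by
      intro hle
      have := hiff.mpr hle
      rw [h] at this; exact absurd this (by decide)
    simp only []
    rw [if_pos (by omega)]
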